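-- pv_equiv track=rewrite | github.com/edanliahovetsky/wpilib-agent-tools | agent/src/wpilib_agent_tools/commands/graph.py | _expand_keys
-- ===== SOURCE A (Python) =====
-- def _expand_keys(keys: list[str]) -> list[str]:
--     expanded: list[str] = []
--     for key in keys:
--         # Accept both repeated --key flags and comma-separated key lists.
--         for piece in key.split(","):
--             normalized = piece.strip()
--             if normalized:
--                 expanded.append(normalized)
--     return expanded
-- ===== SOURCE B (Python) =====
-- def _flush(buf, out):
--     # Trim whitespace from both ends by index, then emit the token if non-empty.
--     i, j = 0, len(buf)
--     while i < j and buf[i].isspace():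
--         i += 1
--     while j > i and buf[j - 1].isspace():
--         j -= 1
--     if i < j:
--         out.append("".join(buf[i:j]))
--
--
-- def _expand_keys(keys: list[str]) -> list[str]:
--     # Character-level tokenizer: scan each key one character at a time,
--     # accumulating the current token in a buffer; a comma (or the end of the
--     # key) flushes the buffer. No split()/strip() calls at all.
--     out: list[str] = []
--     for key in keys:
--         buf: list[str] = []
--         for ch in key:
--             if ch == ",":
--                 _flush(buf, out)
--                 buf = []
--             else:
--                 buf.append(ch)
--         _flush(buf, out)
--     return out
-- ===== Notes on version B (the rewrite author's own statement) =====
-- stated objective: alternative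
-- what changed: Replaces the split/strip/filter pipeline by a character-level tokenizer: a single scan over each key's characters accumulates a buffer that is flushed (index-trimmed and emitted if non-empty) at each comma and at end of key, with no calls to split() or strip().
import Mathlib
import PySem

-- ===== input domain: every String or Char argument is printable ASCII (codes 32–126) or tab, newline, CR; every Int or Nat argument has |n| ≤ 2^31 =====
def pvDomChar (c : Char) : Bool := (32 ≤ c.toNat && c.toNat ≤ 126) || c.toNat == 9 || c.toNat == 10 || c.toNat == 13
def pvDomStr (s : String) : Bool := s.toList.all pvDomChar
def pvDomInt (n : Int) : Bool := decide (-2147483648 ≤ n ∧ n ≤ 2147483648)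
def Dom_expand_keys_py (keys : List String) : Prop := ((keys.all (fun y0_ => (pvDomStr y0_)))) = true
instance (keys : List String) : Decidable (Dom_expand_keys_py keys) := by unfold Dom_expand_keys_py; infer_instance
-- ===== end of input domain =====

-- B replaces A's split/strip/filter pipeline by a character-level tokenizer that
-- scans each key once, flushing an index-trimmed buffer at commas and end of key.


-- ===== PORT A =====
def expand_keys_py (keys : List String) : List String :=
  keys.foldl (fun expanded key =>
    ((PySem.Str.split? key ",").getD []).foldl (fun expanded piece =>
      let normalized := PySem.Str.strip piece
      if normalized ≠ "" then expanded ++ [normalized] else expanded) expanded) []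

-- ===== PORT B =====
-- _flush: trim whitespace off both ends of the buffer (the two index-advancing
-- while loops are transcribed as dropWhile from the left and from the right),
-- emit the token if anything is left.
def pvFlush (buf : List Char) (out : List String) : List String :=
  let t := ((buf.dropWhile PySem.Chars.isspace).reverse.dropWhile PySem.Chars.isspace).reverse
  if t ≠ [] then out ++ [String.ofList t] else out

def expand_keys_py_alt (keys : List String) : List String :=
  (keys.foldl (fun st key =>
      let st2 := key.toList.foldl
        (fun (st : List Char × List String) ch =>
          if ch = ',' then (([] : List Char), pvFlush st.1 st.2)
          else (st.1 ++ [ch], st.2)) st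
      (([] : List Char), pvFlush st2.1 st2.2))
    (([] : List Char), ([] : List String))).2

-- ===== PRECONDITION & SPEC =====
def Spec_expand_keys_py (keys : List String) (out : List String) : Prop := out = expand_keys_py_alt keys
instance (keys : List String) (out : List String) : Decidable (Spec_expand_keys_py keys out) := by unfold Spec_expand_keys_py; infer_instance

-- ===== CLAIM (what is proved, stated in full; the proofs are below) =====
def Claim_equal_expand_keys_py : Prop := ∀ (keys : List String), Dom_expand_keys_py keys → Spec_expand_keys_py keys (expand_keys_py keys)

-- ===== LEMMAS AND PROOFS =====

-- the non-empty stripped fragments of a char list, as strings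
def pvTokens (l : List Char) : List String :=
  (((l.splitOn ',').map PySem.Chars.strip).filter (fun t => t ≠ [])).map String.ofList

theorem pv_modifyHead_congr {α : Type} (f g : α → α) (l : List α)
    (h : ∀ x, f x = g x) : List.modifyHead f l = List.modifyHead g l := by
  cases l <;> simp [h]

-- fuel-based splitOn.go on a single-char separator computes Mathlib's List.splitOnP
theorem pv_splitOn_go_singleton (c : Char) (l : List Char) : ∀ (fuel : Nat) (cur : List Char)
    (acc : List (List Char)), l.length ≤ fuel →
    PySem.Chars.splitOn.go [c] fuel l cur acc
      = acc.reverse ++ (l.splitOnP (· == c)).modifyHead (cur.reverse ++ ·) := by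
  induction l with
  | nil =>
    intro fuel cur acc _
    cases fuel <;> simp [PySem.Chars.splitOn.go, List.splitOnP_nil]
  | cons c' rest ih =>
    intro fuel cur acc hfuel
    cases fuel with
    | zero => simp at hfuel
    | succ f =>
      rw [PySem.Chars.splitOn.go]
      by_cases h : c' = c
      · subst h
        simp only [List.isPrefixOf, beq_self_eq_true, Bool.true_and, if_true]
        have hdrop : List.drop [c'].length (c' :: rest) = rest := rfl
        rw [hdrop, ih f [] (cur.reverse :: acc) (by simpa using Nat.le_of_succ_le_succ hfuel)]
        rw [pv_modifyHead_congr (fun x => [].reverse ++ x) id _ (by simp)]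
        simp [List.splitOnP_cons]
      · have hb : ([c].isPrefixOf (c' :: rest)) = false := by
          simp only [List.isPrefixOf, Bool.and_true, beq_eq_false_iff_ne, ne_eq]
          exact fun hc => h hc.symm
        simp only [hb, Bool.false_eq_true, if_false]
        rw [ih f (c' :: cur) acc (by simpa using Nat.le_of_succ_le_succ hfuel)]
        simp only [List.splitOnP_cons, beq_iff_eq, h, if_false, List.modifyHead_modifyHead]
        exact congrArg _ (pv_modifyHead_congr _ _ _ (fun x => by simp))

theorem pv_splitOn_singleton (c : Char) (l : List Char) :
    PySem.Chars.splitOn l [c] = l.splitOn c := by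
  rw [PySem.Chars.splitOn, pv_splitOn_go_singleton c l (l.length + 1) [] []
    (Nat.le_succ _)]
  show List.modifyHead id _ = _
  simp [List.splitOn]

-- A's nested foldl collects, per key, the non-empty stripped pieces
theorem pv_inner_foldl (ps : List String) (acc : List String) :
    ps.foldl (fun expanded piece =>
      let normalized := PySem.Str.strip piece
      if normalized ≠ "" then expanded ++ [normalized] else expanded) acc
      = acc ++ (ps.map PySem.Str.strip).filter (fun s => s ≠ "") := by
  induction ps generalizing acc with
  | nil => simp
  | cons p ps ih =>
    rw [List.foldl_cons]
    by_cases h : PySem.Str.strip p = "" <;> rw [ih] <;> simp [h]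

-- A's per-key contribution is exactly pvTokens of the key's characters
theorem pv_key_tokens (key : String) :
    ((((PySem.Str.split? key ",").getD []).map PySem.Str.strip).filter
      (fun s => s ≠ "")) = pvTokens key.toList := by
  have hsep : (",".toList : List Char) = [','] := rfl
  simp only [PySem.Str.split?, PySem.Chars.split?, hsep, List.isEmpty_cons,
    Bool.false_eq_true, if_false, Option.map_some, Option.getD_some,
    pv_splitOn_singleton]
  rw [List.map_map, pvTokens]
  have hf : (PySem.Str.strip ∘ String.ofList) = (String.ofList ∘ PySem.Chars.strip) := by
    funext t; simp [Function.comp, PySem.Str.strip]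
  rw [hf, List.filter_map, List.filter_map, List.map_map]
  have hq : ((fun s => decide (s ≠ "")) ∘ (String.ofList ∘ PySem.Chars.strip))
      = ((fun t => decide (t ≠ [])) ∘ PySem.Chars.strip) := by
    funext t; simp [Function.comp]
  rw [hq]

theorem pv_expand_keys_py_eq (keys : List String) :
    expand_keys_py keys = keys.flatMap (fun key => pvTokens key.toList) := by
  unfold expand_keys_py
  induction keys using List.reverseRecOn with
  | nil => simp
  | append_singleton ks k ih =>
    rw [List.foldl_append, List.flatMap_append, ← ih, List.foldl_cons, List.foldl_nil,
      pv_inner_foldl, pv_key_tokens]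
    simp

-- flush is "append the stripped buffer if non-empty"
theorem pv_flush_eq (buf : List Char) (out : List String) :
    pvFlush buf out
      = out ++ (if PySem.Chars.strip buf ≠ [] then [String.ofList (PySem.Chars.strip buf)] else []) := by
  have ht : ((buf.dropWhile PySem.Chars.isspace).reverse.dropWhile PySem.Chars.isspace).reverse
      = PySem.Chars.strip buf := rfl
  rw [pvFlush]
  simp only [ht]
  split_ifs <;> simp

-- tokens of a comma-free buffer
theorem pv_tokens_nocomma (buf : List Char) (h : ',' ∉ buf) :
    pvTokens buf
      = (if PySem.Chars.strip buf ≠ [] then [String.ofList (PySem.Chars.strip buf)] else []) := by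
  rw [pvTokens, List.splitOn, List.splitOnP_eq_single _ _ (by
    intro x hx hc; exact h (by simpa using (beq_iff_eq.mp hc) ▸ hx))]
  split_ifs with hs <;> simp_all

-- tokens split at a comma after a comma-free buffer
theorem pv_tokens_comma (buf cs : List Char) :
    pvTokens (buf ++ ',' :: cs) = pvTokens buf ++ pvTokens cs := by
  rw [pvTokens, List.splitOn, List.splitOnP_append_cons _ _ _ ',' (by simp)]
  simp [pvTokens, List.splitOn]

-- scanning one key's characters from state (buf, out) and flushing
theorem pv_scan (cs : List Char) : ∀ (buf : List Char) (out : List String), ',' ∉ buf →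
    (let st2 := cs.foldl
        (fun (st : List Char × List String) ch =>
          if ch = ',' then (([] : List Char), pvFlush st.1 st.2)
          else (st.1 ++ [ch], st.2)) (buf, out)
     pvFlush st2.1 st2.2) = out ++ pvTokens (buf ++ cs) := by
  induction cs with
  | nil =>
    intro buf out h
    simp only [List.foldl_nil, List.append_nil]
    rw [pv_flush_eq, pv_tokens_nocomma buf h]
  | cons c cs ih =>
    intro buf out h
    simp only [List.foldl_cons]
    by_cases hc : c = ','
    · subst hc
      simp only [if_true]
      rw [ih [] (pvFlush buf out) (by simp), pv_flush_eq, pv_tokens_comma buf cs,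
        pv_tokens_nocomma buf h, List.append_assoc]
      simp
    · simp only [hc, if_false]
      rw [ih (buf ++ [c]) out (by simp [h]; intro hcc; exact hc hcc.symm)]
      simp

theorem pv_alt_eq (keys : List String) :
    expand_keys_py_alt keys = keys.flatMap (fun key => pvTokens key.toList) := by
  unfold expand_keys_py_alt
  have main : ∀ (ks : List String) (out : List String),
      (ks.foldl (fun st key =>
        let st2 := key.toList.foldl
          (fun (st : List Char × List String) ch =>
            if ch = ',' then (([] : List Char), pvFlush st.1 st.2)
            else (st.1 ++ [ch], st.2)) st
        (([] : List Char), pvFlush st2.1 st2.2)) (([] : List Char), out)).2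
        = out ++ ks.flatMap (fun key => pvTokens key.toList) := by
    intro ks
    induction ks with
    | nil => intro out; simp
    | cons k ks ih =>
      intro out
      simp only [List.foldl_cons, List.flatMap_cons]
      have hk := pv_scan k.toList [] out (by simp)
      simp only [List.nil_append] at hk
      rw [hk, ih, List.append_assoc]
  rw [main keys []]
  simp

-- ===== VERDICT (by name: the statement is the Claim_ definition above) =====
theorem expand_keys_py_spec : Claim_equal_expand_keys_py := by
  intro keys _
  unfold Spec_expand_keys_py
  rw [pv_expand_keys_py_eq, pv_alt_eq]
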